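-- pv_equiv track=rewrite | github.com/TFeld00/AdventOfCode | 2022/alg/util.py | parse_skip_headers
-- ===== SOURCE A (Python) =====
-- def parse_skip_headers(F):
--     d = []
--     r = []
--     n = ''
--     for l in F:
--         if not l:
--             d += [r]
--             n = ''
--             r = []
--         elif l and not n:
--             n = l
--         elif n:
--             r += [l]
--     if r:
--         d += [r]
--     return d
-- ===== SOURCE B (Python) =====
-- def parse_skip_headers(F):
--     # Phase 1: split lines into raw groups on blank lines (no header logic here).
--     groups = []
--     cur = []
--     for l in F:
--         if l:
--             cur.append(l)
--         else:
--             groups.append(cur)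
--             cur = []
--     # Phase 2: drop each completed group's header line; append the final
--     # group's body only if it is nonempty.
--     res = [g[1:] for g in groups]
--     if cur[1:]:
--         res.append(cur[1:])
--     return res
-- ===== Notes on version B (the rewrite author's own statement) =====
-- stated objective: simpler
-- what changed: Replaces A's three-branch inline header-skipping state machine (output list, body list, header flag) with a two-phase decomposition: first split lines into raw groups on blank lines, then drop each completed group's header line and append the final group's body only when nonempty.
import Mathlib
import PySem

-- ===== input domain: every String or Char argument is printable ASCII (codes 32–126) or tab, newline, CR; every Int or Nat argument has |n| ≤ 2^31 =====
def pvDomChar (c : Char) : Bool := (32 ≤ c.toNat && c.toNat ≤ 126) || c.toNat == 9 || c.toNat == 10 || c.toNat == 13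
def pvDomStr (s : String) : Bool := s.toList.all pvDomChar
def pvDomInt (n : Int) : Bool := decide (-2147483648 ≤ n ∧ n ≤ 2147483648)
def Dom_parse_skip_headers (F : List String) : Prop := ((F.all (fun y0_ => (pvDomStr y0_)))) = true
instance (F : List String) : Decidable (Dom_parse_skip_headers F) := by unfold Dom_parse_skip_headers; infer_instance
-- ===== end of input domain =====

-- B replaces A's inline three-branch header-skipping state machine by a two-phase
-- split-on-blank-lines then drop-headers decomposition (objective: simpler).

-- ===== PORT A =====
-- state: (d, r, n)
def parse_skip_headers (F : List String) : List (List String) :=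
  let s := F.foldl (fun (st : List (List String) × List String × String) l =>
      if l = "" then (st.1 ++ [st.2.1], [], "")
      else if l ≠ "" ∧ st.2.2 = "" then (st.1, st.2.1, l)
      else if st.2.2 ≠ "" then (st.1, st.2.1 ++ [l], st.2.2)
      else st) ([], [], "")
  if s.2.1 ≠ [] then s.1 ++ [s.2.1] else s.1

-- ===== PORT B =====
-- state: (groups, cur); then map g[1:] over groups and append cur[1:] if nonempty
def parse_skip_headers_alt (F : List String) : List (List String) :=
  let p := F.foldl (fun (st : List (List String) × List String) l =>
      if l ≠ "" then (st.1, st.2 ++ [l]) else (st.1 ++ [st.2], [])) ([], [])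
  let res := p.1.map (fun g => g.drop 1)
  if p.2.drop 1 ≠ [] then res ++ [p.2.drop 1] else res

-- ===== PRECONDITION & SPEC =====
def Spec_parse_skip_headers (F : List String) (out : List (List String)) : Prop := out = parse_skip_headers_alt F
instance (F : List String) (out : List (List String)) : Decidable (Spec_parse_skip_headers F out) := by unfold Spec_parse_skip_headers; infer_instance

-- ===== CLAIM (what is proved, stated in full; the proofs are below) =====
def Claim_equal_parse_skip_headers : Prop := ∀ (F : List String), Dom_parse_skip_headers F → Spec_parse_skip_headers F (parse_skip_headers F)

-- ===== LEMMAS AND PROOFS =====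

def pvStepA (st : List (List String) × List String × String) (l : String) :
    List (List String) × List String × String :=
  if l = "" then (st.1 ++ [st.2.1], [], "")
  else if l ≠ "" ∧ st.2.2 = "" then (st.1, st.2.1, l)
  else if st.2.2 ≠ "" then (st.1, st.2.1 ++ [l], st.2.2)
  else st

def pvStepB (st : List (List String) × List String) (l : String) :
    List (List String) × List String :=
  if l ≠ "" then (st.1, st.2 ++ [l]) else (st.1 ++ [st.2], [])

theorem pvStepA_blank (d : List (List String)) (r : List String) (n : String) :
    pvStepA (d, r, n) "" = (d ++ [r], [], "") := by simp [pvStepA]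

theorem pvStepA_hdr (d : List (List String)) (r : List String) (l : String)
    (hl : l ≠ "") : pvStepA (d, r, "") l = (d, r, l) := by simp [pvStepA, hl]

theorem pvStepA_body (d : List (List String)) (r : List String) (n l : String)
    (hl : l ≠ "") (hn : n ≠ "") : pvStepA (d, r, n) l = (d, r ++ [l], n) := by
  simp [pvStepA, hl, hn]

theorem pvStepB_blank (gs : List (List String)) (cur : List String) :
    pvStepB (gs, cur) "" = (gs ++ [cur], []) := by simp [pvStepB]

theorem pvStepB_line (gs : List (List String)) (cur : List String) (l : String)
    (hl : l ≠ "") : pvStepB (gs, cur) l = (gs, cur ++ [l]) := by simp [pvStepB, hl]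

-- Main invariant: A's body r is B's current raw group minus its header line,
-- A's header flag n is empty iff B's current group is empty, and A's output so
-- far is B's completed groups with headers dropped.
theorem pvKey (F : List String) (d gs : List (List String)) (r cur : List String)
    (n : String) (h1 : (n = "") ↔ (cur = [])) (h2 : cur.drop 1 = r)
    (h3 : d = gs.map (fun g => g.drop 1)) :
    (let s := F.foldl pvStepA (d, r, n);
     if s.2.1 ≠ [] then s.1 ++ [s.2.1] else s.1)
    = (let p := F.foldl pvStepB (gs, cur);
       let res := p.1.map (fun g => g.drop 1);
       if p.2.drop 1 ≠ [] then res ++ [p.2.drop 1] else res) := by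
  induction F generalizing d gs r cur n with
  | nil =>
    simp only [List.foldl_nil]
    rw [h3, ← h2]
  | cons l ls ih =>
    by_cases hl : l = ""
    · subst hl
      rw [List.foldl_cons, List.foldl_cons, pvStepA_blank, pvStepB_blank]
      exact ih _ _ _ _ "" (by simp) (by simp)
        (by rw [h3, ← h2]; simp)
    · by_cases hn : n = ""
      · have hcur : cur = [] := h1.mp hn
        have hr : r = [] := by rw [← h2, hcur]; rfl
        subst hn hcur hr
        rw [List.foldl_cons, List.foldl_cons, pvStepA_hdr _ _ _ hl, pvStepB_line _ _ _ hl]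
        exact ih _ _ _ _ l (by simp [hl]) (by simp) h3
      · have hcur : cur ≠ [] := fun hc => hn (h1.mpr hc)
        rw [List.foldl_cons, List.foldl_cons, pvStepA_body _ _ _ _ hl hn,
          pvStepB_line _ _ _ hl]
        refine ih _ _ _ _ n (iff_of_false hn (by simp)) ?_ h3
        obtain ⟨c, cs, rfl⟩ := List.exists_cons_of_ne_nil hcur
        rw [← h2]
        rfl

-- ===== VERDICT (by name: the statement is the Claim_ definition above) =====
theorem parse_skip_headers_spec : Claim_equal_parse_skip_headers := by
  intro F _
  exact pvKey F [] [] [] [] "" (by simp) rfl rfl
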